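-- pv_equiv track=rewrite | github.com/SGaidi/practice-questions | data-structures/array.py | consecutiveSubarrayIn
-- ===== SOURCE A (Python) =====
-- from typing import List, Tuple
--
-- def consecutiveSubarrayIn(arr: List[int]) -> List[List[int]]:
-- 	min_and_max = {(i, i): (arr[i], arr[i]) for i in range(len(arr))}
-- 	solutions = []
--
-- 	for s_idx in range(len(arr)):
-- 		for e_idx in range(s_idx+1, len(arr)):
-- 			# subarray from s_idx, s_idx+1, ... , e_idx (including e_idx)
-- 			min_val, max_val = min_and_max[(s_idx, e_idx-1)]
-- 			min_val = min(min_val, arr[e_idx])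
-- 			max_val = max(max_val, arr[e_idx])
-- 			min_and_max[(s_idx, e_idx)] = min_val, max_val
-- 			if e_idx-s_idx != max_val-min_val:
-- 				continue
-- 			subarray = set(arr[s_idx:e_idx+1])
-- 			if len(subarray) == e_idx-s_idx+1:
-- 				solutions.append(arr[s_idx:e_idx+1])
--
-- 	return solutions
-- ===== SOURCE B (Python) =====
-- from typing import List
--
-- def consecutiveSubarrayIn(arr: List[int]) -> List[List[int]]:
--     solutions = []
--     for s in range(len(arr)):
--         a = arr[s]
--         mn = mx = a
--         seen = {a}
--         sub = [a]
--         for x in arr[s + 1:]: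
--             if x in seen:
--                 break
--             seen.add(x)
--             sub.append(x)
--             if x < mn:
--                 mn = x
--             if x > mx:
--                 mx = x
--             if mx - mn == len(sub) - 1:
--                 solutions.append(sub.copy())
--     return solutions
-- ===== Notes on version B (the rewrite author's own statement) =====
-- stated objective: faster
-- what changed: Per start index B extends the window incrementally with a running min/max and a seen-set, breaking at the first duplicate, instead of A's per-window dict of (start,end) min/max plus an O(k) set-of-slice distinctness test for every window.
import Mathlib
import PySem

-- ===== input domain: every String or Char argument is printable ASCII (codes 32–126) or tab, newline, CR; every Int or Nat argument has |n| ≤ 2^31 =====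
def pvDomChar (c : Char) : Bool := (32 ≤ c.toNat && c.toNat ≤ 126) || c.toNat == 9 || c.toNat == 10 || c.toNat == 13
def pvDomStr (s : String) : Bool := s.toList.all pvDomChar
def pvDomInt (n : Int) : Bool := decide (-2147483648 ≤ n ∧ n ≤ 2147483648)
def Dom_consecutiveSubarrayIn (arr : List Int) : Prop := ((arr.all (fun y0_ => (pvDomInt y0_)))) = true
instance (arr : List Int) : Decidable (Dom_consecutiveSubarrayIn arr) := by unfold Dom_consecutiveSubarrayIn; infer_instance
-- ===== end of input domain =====

-- B replaces A's per-window dict of (min,max) and per-window set-of-slice distinctness test by one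
-- incremental window per start index (running min/max, seen-set, break at the first duplicate): faster.

-- ===== PORT A =====
-- the body of A's inner loop, threading (min_and_max, solutions)
def pvStepA (arr : List Int) (s : Int)
    (st2 : PySem.Dict (Int × Int) (Int × Int) × List (List Int)) (e : Int) :
    PySem.Dict (Int × Int) (Int × Int) × List (List Int) :=
  let mm := st2.1.getD (s, e - 1) (0, 0)
  let mn := min mm.1 (PySem.List.pyGetD arr e 0)
  let mx := max mm.2 (PySem.List.pyGetD arr e 0)
  let d' := st2.1.insert (s, e) (mn, mx)
  if e - s ≠ mx - mn then (d', st2.2)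
  else
    let sub := PySem.Set.ofList (PySem.List.slice arr (some s) (some (e + 1)))
    if (PySem.Set.len sub : Int) = e - s + 1 then
      (d', st2.2 ++ [PySem.List.slice arr (some s) (some (e + 1))])
    else (d', st2.2)

def consecutiveSubarrayIn (arr : List Int) : List (List Int) :=
  let n : Int := (arr.length : Int)
  -- min_and_max = {(i, i): (arr[i], arr[i]) for i in range(len(arr))}
  let d0 : PySem.Dict (Int × Int) (Int × Int) :=
    (PySem.List.pyRange 0 n 1).foldl
      (fun d i => d.insert (i, i) (PySem.List.pyGetD arr i 0, PySem.List.pyGetD arr i 0))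
      PySem.Dict.empty
  let r :=
    (PySem.List.pyRange 0 n 1).foldl
      (fun st s => (PySem.List.pyRange (s + 1) n 1).foldl (pvStepA arr s) st)
      (d0, ([] : List (List Int)))
  r.2

-- ===== PORT B =====
-- inner 'for x in arr[s+1:]' loop with break: structural recursion over the remaining elements
def pvInnerB : Int → Int → PySem.Set Int → List Int → List (List Int) → List Int → List (List Int)
  | _, _, _, _, sols, [] => sols
  | mn, mx, seen, sub, sols, x :: rest =>
    if PySem.Set.contains seen x then sols
    else
      let seen' := PySem.Set.add seen x
      let sub' := sub ++ [x]
      let mn' := if x < mn then x else mn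
      let mx' := if x > mx then x else mx
      let sols' := if mx' - mn' = (sub'.length : Int) - 1 then sols ++ [sub'] else sols
      pvInnerB mn' mx' seen' sub' sols' rest

def consecutiveSubarrayIn_alt (arr : List Int) : List (List Int) :=
  (PySem.List.pyRange 0 (arr.length : Int) 1).foldl
    (fun sols s =>
      let a := PySem.List.pyGetD arr s 0
      pvInnerB a a (PySem.Set.ofList [a]) [a] sols (PySem.List.slice arr (some (s + 1)) none))
    []

-- ===== PRECONDITION & SPEC =====
def Spec_consecutiveSubarrayIn (arr : List Int) (out : List (List Int)) : Prop := out = consecutiveSubarrayIn_alt arr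
instance (arr : List Int) (out : List (List Int)) : Decidable (Spec_consecutiveSubarrayIn arr out) := by unfold Spec_consecutiveSubarrayIn; infer_instance

-- ===== CLAIM (what is proved, stated in full; the proofs are below) =====
def Claim_equal_consecutiveSubarrayIn : Prop := ∀ (arr : List Int), Dom_consecutiveSubarrayIn arr → Spec_consecutiveSubarrayIn arr (consecutiveSubarrayIn arr)

-- ===== LEMMAS AND PROOFS =====

def pvWin (arr : List Int) (s e : Int) : List Int := PySem.List.slice arr (some s) (some (e + 1))

theorem pvWin_single (arr : List Int) (s : Int) (h0 : 0 ≤ s) (h1 : s < (arr.length : Int)) :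
    pvWin arr s s = [PySem.List.pyGetD arr s 0] := by
  have hs : s.toNat < arr.length := by omega
  rw [pvWin, PySem.List.slice_toNat (xs := arr) (a := s) (b := s + 1) (by omega) (by omega),
      PySem.List.pyGetD_eq_getElem arr 0 h0 h1]
  have h2 : (s+1).toNat - s.toNat = 1 := by omega
  rw [h2, List.drop_eq_getElem_cons hs, List.take_succ_cons, List.take_zero]

theorem pvWin_snoc (arr : List Int) (s e : Int) (h0 : 0 ≤ s) (h1 : s ≤ e) (h2 : e < (arr.length : Int)) :
    pvWin arr s e = pvWin arr s (e - 1) ++ [PySem.List.pyGetD arr e 0] := by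
  have he : e.toNat < arr.length := by omega
  rw [pvWin, pvWin, PySem.List.slice_toNat (xs := arr) (a := s) (b := e + 1) (by omega) (by omega),
      PySem.List.slice_toNat (xs := arr) (a := s) (b := e - 1 + 1) (by omega) (by omega),
      PySem.List.pyGetD_eq_getElem arr 0 (by omega) h2]
  have h3 : (e+1).toNat - s.toNat = (e.toNat - s.toNat) + 1 := by omega
  have h4 : (e-1+1).toNat - s.toNat = e.toNat - s.toNat := by omega
  rw [h3, h4, List.take_add_one]
  congr 1
  have h5 : s.toNat + (e.toNat - s.toNat) = e.toNat := by omega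
  simp [List.getElem?_drop, h5, he]

theorem pvWin_length (arr : List Int) (s e : Int) (h0 : 0 ≤ s) (h1 : s ≤ e) (h2 : e < (arr.length : Int)) :
    ((pvWin arr s e).length : Int) = e + 1 - s := by
  rw [pvWin, PySem.List.slice_toNat (xs := arr) (a := s) (b := e + 1) (by omega) (by omega)]
  simp only [List.length_take, List.length_drop]
  omega

def pvMin : List Int → Int
  | [] => 0
  | a :: t => t.foldl min a

def pvMax : List Int → Int
  | [] => 0
  | a :: t => t.foldl max a

theorem pvMin_snoc (l : List Int) (x : Int) (h : l ≠ []) : pvMin (l ++ [x]) = min (pvMin l) x := by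
  obtain ⟨a, t, rfl⟩ := List.exists_cons_of_ne_nil h
  simp [pvMin, List.foldl_append]

theorem pvMax_snoc (l : List Int) (x : Int) (h : l ≠ []) : pvMax (l ++ [x]) = max (pvMax l) x := by
  obtain ⟨a, t, rfl⟩ := List.exists_cons_of_ne_nil h
  simp [pvMax, List.foldl_append]

theorem setlen_lt_of_not_nodup (w : List Int) (h : ¬ w.Nodup) :
    (PySem.Set.ofList w).length < w.length := by
  induction w using List.reverseRecOn with
  | nil => simp at h
  | append_singleton l x ih =>
    rw [PySem.Set.ofList_append_singleton, PySem.Set.add_eq_ite]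
    by_cases hnd : l.Nodup
    · have hx : x ∈ l := by
        by_contra hx
        exact h (List.Nodup.append hnd (List.nodup_singleton x) (by simpa using hx))
      have hm : x ∈ PySem.Set.ofList l := by
        rw [PySem.Set.ofList_eq_self_of_nodup l hnd]; exact hx
      simp only [hm, if_pos]
      rw [PySem.Set.ofList_eq_self_of_nodup l hnd]
      simp
    · have := ih hnd
      split <;> simp <;> omega


def pvF (arr : List Int) (s e : Int) : List (List Int) :=
  if _h : e < (arr.length : Int) then
    (if (e - s = pvMax (pvWin arr s e) - pvMin (pvWin arr s e) ∧
         ((PySem.Set.ofList (pvWin arr s e)).length : Int) = e - s + 1)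
      then [pvWin arr s e] else []) ++ pvF arr s (e + 1)
  else []
termination_by ((arr.length : Int) - e).toNat
decreasing_by omega

def pvG (arr : List Int) (s : Int) : List (List Int) :=
  if _h : s < (arr.length : Int) then pvF arr s (s + 1) ++ pvG arr (s + 1) else []
termination_by ((arr.length : Int) - s).toNat
decreasing_by omega

theorem pvWin_ne_nil (arr : List Int) (s e : Int) (h0 : 0 ≤ s) (h1 : s ≤ e) (h2 : e < (arr.length : Int)) :
    pvWin arr s e ≠ [] := by
  have := pvWin_length arr s e h0 h1 h2
  intro hnil
  rw [hnil] at this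
  simp at this
  omega

theorem pvF_nil_of_dup (arr : List Int) (s : Int) :
    ∀ k e, ((arr.length : Int) - e).toNat = k → 0 ≤ s → s ≤ e → ¬ (pvWin arr s e).Nodup →
      pvF arr s e = [] := by
  intro k
  induction k using Nat.strong_induction_on with
  | _ k ih =>
    intro e hk h0 h1 hnd
    rw [pvF]
    split
    case isFalse => rfl
    case isTrue h =>
      have hcond : ¬ (e - s = pvMax (pvWin arr s e) - pvMin (pvWin arr s e) ∧
          ((PySem.Set.ofList (pvWin arr s e)).length : Int) = e - s + 1) := by
        rintro ⟨-, hlen⟩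
        have hlt := setlen_lt_of_not_nodup _ hnd
        have hL := pvWin_length arr s e h0 h1 h
        omega
      rw [if_neg hcond, List.nil_append]
      by_cases h2 : e + 1 < (arr.length : Int)
      · apply ih (((arr.length : Int) - (e + 1)).toNat) (by omega) (e + 1) rfl h0 (by omega)
        intro hnd'
        rw [pvWin_snoc arr s (e + 1) h0 (by omega) h2] at hnd'
        have h3 : e + 1 - 1 = e := by ring
        rw [h3] at hnd'
        exact hnd hnd'.of_append_left
      · rw [pvF]
        simp [h2]

-- ===== A side characterization =====

def pvInv (arr : List Int) (d : PySem.Dict (Int × Int) (Int × Int)) : Prop :=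
  ∀ i : Int, 0 ≤ i → i < (arr.length : Int) →
    d.getD (i, i) (0, 0) = (PySem.List.pyGetD arr i 0, PySem.List.pyGetD arr i 0)

theorem pvA_inner (arr : List Int) (s : Int) :
    ∀ k e (d : PySem.Dict (Int × Int) (Int × Int)) (sols : List (List Int)),
      ((arr.length : Int) - e).toNat = k → 0 ≤ s → s < e → e ≤ (arr.length : Int) →
      pvInv arr d →
      d.getD (s, e - 1) (0, 0) = (pvMin (pvWin arr s (e - 1)), pvMax (pvWin arr s (e - 1))) →
      ((PySem.List.pyRange e (arr.length : Int) 1).foldl (pvStepA arr s) (d, sols)).2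
          = sols ++ pvF arr s e ∧
        pvInv arr ((PySem.List.pyRange e (arr.length : Int) 1).foldl (pvStepA arr s) (d, sols)).1 := by
  intro k
  induction k using Nat.strong_induction_on with
  | _ k ih =>
    intro e d sols hk h0 h1 h2 hInv hkey
    by_cases h : e < (arr.length : Int)
    · rw [PySem.List.pyRange_one_cons h, List.foldl_cons]
      -- evaluate one step
      have hx : PySem.List.pyGetD arr e 0 = PySem.List.pyGetD arr e 0 := rfl
      have hwin : pvWin arr s e = pvWin arr s (e - 1) ++ [PySem.List.pyGetD arr e 0] :=
        pvWin_snoc arr s e h0 (by omega) h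
      have hne : pvWin arr s (e - 1) ≠ [] :=
        pvWin_ne_nil arr s (e - 1) h0 (by omega) (by omega)
      have hmn : pvMin (pvWin arr s e) = min (pvMin (pvWin arr s (e - 1))) (PySem.List.pyGetD arr e 0) := by
        rw [hwin, pvMin_snoc _ _ hne]
      have hmx : pvMax (pvWin arr s e) = max (pvMax (pvWin arr s (e - 1))) (PySem.List.pyGetD arr e 0) := by
        rw [hwin, pvMax_snoc _ _ hne]
      -- the step produces (d', sols ++ c)
      have hstep : pvStepA arr s (d, sols) e =
          (d.insert (s, e) (pvMin (pvWin arr s e), pvMax (pvWin arr s e)),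
            sols ++ (if (e - s = pvMax (pvWin arr s e) - pvMin (pvWin arr s e) ∧
              ((PySem.Set.ofList (pvWin arr s e)).length : Int) = e - s + 1)
              then [pvWin arr s e] else [])) := by
        rw [pvStepA]
        simp only [hkey, PySem.Set.len]
        rw [show PySem.List.slice arr (some s) (some (e + 1)) = pvWin arr s e from rfl]
        rw [← hmn, ← hmx]
        by_cases hc1 : e - s = pvMax (pvWin arr s e) - pvMin (pvWin arr s e)
        · rw [if_neg (by omega)]
          by_cases hc2 : ((PySem.Set.ofList (pvWin arr s e)).length : Int) = e - s + 1
          · rw [if_pos hc2, if_pos ⟨hc1, hc2⟩]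
          · rw [if_neg hc2, if_neg (by tauto)]; simp
        · rw [if_pos (by omega), if_neg (by tauto)]; simp
      rw [hstep]
      have hInv' : pvInv arr (d.insert (s, e) (pvMin (pvWin arr s e), pvMax (pvWin arr s e))) := by
        intro i hi0 hi1
        rw [PySem.Dict.getD_insert_of_ne _ _ _ (by intro hie; injection hie with a b; omega)]
        exact hInv i hi0 hi1
      have hkey' : (d.insert (s, e) (pvMin (pvWin arr s e), pvMax (pvWin arr s e))).getD
          (s, e + 1 - 1) (0, 0) = (pvMin (pvWin arr s (e + 1 - 1)), pvMax (pvWin arr s (e + 1 - 1))) := by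
        have h3 : e + 1 - 1 = e := by ring
        rw [h3, PySem.Dict.getD_insert_self]
      obtain ⟨hres, hinvres⟩ := ih (((arr.length : Int) - (e + 1)).toNat) (by omega) (e + 1) _ _
        rfl h0 (by omega) (by omega) hInv' hkey'
      constructor
      · rw [hres]
        conv_rhs => rw [pvF]
        rw [dif_pos h]
        simp [List.append_assoc]
      · exact hinvres
    · rw [PySem.List.pyRange_one_eq_nil (by omega), List.foldl_nil]
      refine ⟨?_, hInv⟩
      rw [pvF, dif_neg h, List.append_nil]

theorem pvD0_getD (arr : List Int) :
    ∀ k (a : Int) (d : PySem.Dict (Int × Int) (Int × Int)),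
      ((arr.length : Int) - a).toNat = k → 0 ≤ a →
      ∀ i : Int, 0 ≤ i → i < (arr.length : Int) →
        ((PySem.List.pyRange a (arr.length : Int) 1).foldl
            (fun d j => d.insert (j, j) (PySem.List.pyGetD arr j 0, PySem.List.pyGetD arr j 0)) d).getD
            (i, i) (0, 0)
          = if a ≤ i then (PySem.List.pyGetD arr i 0, PySem.List.pyGetD arr i 0)
            else d.getD (i, i) (0, 0) := by
  intro k
  induction k using Nat.strong_induction_on with
  | _ k ih =>
    intro a d hk h0 i hi0 hi1
    by_cases h : a < (arr.length : Int)
    · rw [PySem.List.pyRange_one_cons h, List.foldl_cons]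
      rw [ih (((arr.length : Int) - (a + 1)).toNat) (by omega) (a + 1) _ rfl (by omega) i hi0 hi1]
      by_cases hai : a + 1 ≤ i
      · rw [if_pos hai, if_pos (by omega)]
      · rw [if_neg hai]
        by_cases hia : i = a
        · subst hia
          rw [PySem.Dict.getD_insert_self, if_pos (by omega)]
        · rw [PySem.Dict.getD_insert_of_ne _ _ _ (by intro hie; injection hie with u v; omega),
              if_neg (by omega)]
    · rw [PySem.List.pyRange_one_eq_nil (by omega), List.foldl_nil, if_neg (by omega)]

theorem pvA_outer (arr : List Int) :
    ∀ k (s : Int) (d : PySem.Dict (Int × Int) (Int × Int)) (sols : List (List Int)),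
      ((arr.length : Int) - s).toNat = k → 0 ≤ s → s ≤ (arr.length : Int) → pvInv arr d →
      ((PySem.List.pyRange s (arr.length : Int) 1).foldl
          (fun st s' => (PySem.List.pyRange (s' + 1) (arr.length : Int) 1).foldl (pvStepA arr s') st)
          (d, sols)).2
        = sols ++ pvG arr s := by
  intro k
  induction k using Nat.strong_induction_on with
  | _ k ih =>
    intro s d sols hk h0 h1 hInv
    by_cases h : s < (arr.length : Int)
    · rw [PySem.List.pyRange_one_cons h, List.foldl_cons]
      have hkey : d.getD (s, s + 1 - 1) (0, 0)
          = (pvMin (pvWin arr s (s + 1 - 1)), pvMax (pvWin arr s (s + 1 - 1))) := by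
        have h3 : s + 1 - 1 = s := by ring
        rw [h3, hInv s h0 h, pvWin_single arr s h0 h]
        rfl
      obtain ⟨hres, hinv'⟩ := pvA_inner arr s (((arr.length : Int) - (s + 1)).toNat) (s + 1) d sols
        rfl h0 (by omega) (by omega) hInv hkey
      have hpair : (PySem.List.pyRange (s + 1) (arr.length : Int) 1).foldl (pvStepA arr s) (d, sols)
          = (((PySem.List.pyRange (s + 1) (arr.length : Int) 1).foldl (pvStepA arr s) (d, sols)).1,
             sols ++ pvF arr s (s + 1)) := by
        rw [← hres]
      rw [hpair, ih (((arr.length : Int) - (s + 1)).toNat) (by omega) (s + 1) _ _ rfl (by omega)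
        (by omega) hinv']
      conv_rhs => rw [pvG]
      rw [dif_pos h]
      simp [List.append_assoc]
    · rw [PySem.List.pyRange_one_eq_nil (by omega), List.foldl_nil]
      rw [pvG, dif_neg h, List.append_nil]

theorem pvB_inner (arr : List Int) (s : Int) :
    ∀ (t : List Int) (e mn mx : Int) (seen : PySem.Set Int) (sub : List Int) (sols : List (List Int)),
      0 ≤ s → s < e → e ≤ (arr.length : Int) →
      sub = pvWin arr s (e - 1) → sub.Nodup → seen = PySem.Set.ofList sub →
      mn = pvMin sub → mx = pvMax sub → t = List.drop e.toNat arr →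
      pvInnerB mn mx seen sub sols t = sols ++ pvF arr s e := by
  intro t
  induction t with
  | nil =>
    intro e mn mx seen sub sols h0 h1 h2 hsub hnd hseen hmn hmx ht
    have hlen : arr.length ≤ e.toNat := List.drop_eq_nil_iff.mp ht.symm
    rw [pvInnerB, pvF, dif_neg (by omega), List.append_nil]
  | cons x rest IH =>
    intro e mn mx seen sub sols h0 h1 h2 hsub hnd hseen hmn hmx ht
    have he : e.toNat < arr.length := by
      by_contra hc
      rw [List.drop_eq_nil_iff.mpr (by omega)] at ht
      simp at ht
    have hen : e < (arr.length : Int) := by omega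
    have hdrop := List.drop_eq_getElem_cons he
    rw [hdrop] at ht
    injection ht.symm with hx hrest
    have hxe : x = PySem.List.pyGetD arr e 0 := by
      rw [PySem.List.pyGetD_eq_getElem arr 0 (by omega) hen, hx]
    have hwin : pvWin arr s e = sub ++ [x] := by
      rw [pvWin_snoc arr s e h0 (by omega) hen, ← hsub, ← hxe]
    rw [pvInnerB]
    by_cases hmem : x ∈ sub
    · have hc : PySem.Set.contains seen x = true := by
        rw [hseen]
        exact (PySem.Set.contains_iff _ _).mpr ((PySem.Set.mem_ofList _ _).mpr hmem)
      rw [if_pos hc]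
      have hdup : ¬ (pvWin arr s e).Nodup := by
        rw [hwin]
        intro hnd'
        simp [List.nodup_append] at hnd'
        tauto
      rw [pvF_nil_of_dup arr s (((arr.length : Int) - e).toNat) e rfl h0 (by omega) hdup,
          List.append_nil]
    · have hc : ¬ PySem.Set.contains seen x = true := by
        rw [hseen]
        intro hc
        exact hmem ((PySem.Set.mem_ofList _ _).mp ((PySem.Set.contains_iff _ _).mp hc))
      rw [if_neg hc]
      have hsubne : sub ≠ [] := by
        rw [hsub]
        exact pvWin_ne_nil arr s (e - 1) h0 (by omega) (by omega)
      have hnd' : (sub ++ [x]).Nodup := by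
        simp [List.nodup_append, hnd]
        intro a ha hax
        exact hmem (hax ▸ ha)
      have hmn' : (if x < mn then x else mn) = pvMin (sub ++ [x]) := by
        rw [pvMin_snoc _ _ hsubne, ← hmn, min_def]
        split_ifs <;> omega
      have hmx' : (if x > mx then x else mx) = pvMax (sub ++ [x]) := by
        rw [pvMax_snoc _ _ hsubne, ← hmx, max_def]
        split_ifs <;> omega
      have hwl : ((sub ++ [x]).length : Int) = e + 1 - s := by
        rw [← hwin]
        exact pvWin_length arr s e h0 (by omega) hen
      have hsetlen : ((PySem.Set.ofList (pvWin arr s e)).length : Int) = e - s + 1 := by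
        rw [hwin, PySem.Set.ofList_eq_self_of_nodup _ hnd']
        omega
      have hsols' : (if (if x > mx then x else mx) - (if x < mn then x else mn)
            = ((sub ++ [x]).length : Int) - 1 then sols ++ [sub ++ [x]] else sols)
          = sols ++ (if (e - s = pvMax (pvWin arr s e) - pvMin (pvWin arr s e) ∧
              ((PySem.Set.ofList (pvWin arr s e)).length : Int) = e - s + 1)
              then [pvWin arr s e] else []) := by
        have hsetlen' : ((PySem.Set.ofList (sub ++ [x])).length : Int) = e - s + 1 := by
          rw [← hwin]; exact hsetlen
        rw [hmn', hmx', hwl, hwin]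
        by_cases hcnd : e - s = pvMax (sub ++ [x]) - pvMin (sub ++ [x])
        · rw [if_pos (by omega), if_pos ⟨hcnd, hsetlen'⟩]
        · rw [if_neg (by omega), if_neg (fun hcc => hcnd hcc.1)]
          simp
      simp only
      rw [hsols']
      rw [IH (e + 1) _ _ _ _ _ h0 (by omega) (by omega)
        (by rw [show e + 1 - 1 = e from by ring, hwin]) hnd' (by rw [hseen, PySem.Set.ofList_append_singleton])
        hmn' hmx' (by rw [← hrest]; congr 1; omega)]
      conv_rhs => rw [pvF]
      rw [dif_pos hen]
      simp [List.append_assoc]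

theorem pvB_outer (arr : List Int) :
    ∀ k (s : Int) (sols : List (List Int)),
      ((arr.length : Int) - s).toNat = k → 0 ≤ s → s ≤ (arr.length : Int) →
      ((PySem.List.pyRange s (arr.length : Int) 1).foldl
          (fun sols s' =>
            let a := PySem.List.pyGetD arr s' 0
            pvInnerB a a (PySem.Set.ofList [a]) [a] sols (PySem.List.slice arr (some (s' + 1)) none))
          sols)
        = sols ++ pvG arr s := by
  intro k
  induction k using Nat.strong_induction_on with
  | _ k ih =>
    intro s sols hk h0 h1
    by_cases h : s < (arr.length : Int)
    · rw [PySem.List.pyRange_one_cons h, List.foldl_cons]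
      simp only
      have hstep : pvInnerB (PySem.List.pyGetD arr s 0) (PySem.List.pyGetD arr s 0)
          (PySem.Set.ofList [PySem.List.pyGetD arr s 0]) [PySem.List.pyGetD arr s 0] sols
          (PySem.List.slice arr (some (s + 1)) none)
          = sols ++ pvF arr s (s + 1) := by
        apply pvB_inner arr s _ (s + 1) _ _ _ _ _ h0 (by omega) (by omega)
        · rw [show s + 1 - 1 = s from by ring, pvWin_single arr s h0 h]
        · exact List.nodup_singleton _
        · rfl
        · rfl
        · rfl
        · rw [PySem.List.slice_from (xs := arr) (a := s + 1) (by omega)]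
      rw [hstep, ih (((arr.length : Int) - (s + 1)).toNat) (by omega) (s + 1) _ rfl (by omega) (by omega)]
      conv_rhs => rw [pvG]
      rw [dif_pos h]
      simp [List.append_assoc]
    · rw [PySem.List.pyRange_one_eq_nil (by omega), List.foldl_nil, pvG, dif_neg h, List.append_nil]

-- ===== VERDICT (by name: the statement is the Claim_ definition above) =====
theorem consecutiveSubarrayIn_spec : Claim_equal_consecutiveSubarrayIn := by
  intro arr _
  show consecutiveSubarrayIn arr = consecutiveSubarrayIn_alt arr
  have hInv0 : pvInv arr ((PySem.List.pyRange 0 (arr.length : Int) 1).foldl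
      (fun d i => d.insert (i, i) (PySem.List.pyGetD arr i 0, PySem.List.pyGetD arr i 0))
      PySem.Dict.empty) := by
    intro i hi0 hi1
    rw [pvD0_getD arr ((arr.length : Int) - 0).toNat 0 _ rfl (by omega) i hi0 hi1, if_pos hi0]
  rw [consecutiveSubarrayIn, consecutiveSubarrayIn_alt]
  simp only
  rw [pvA_outer arr ((arr.length : Int) - 0).toNat 0 _ [] rfl (by omega) (by omega) hInv0,
      pvB_outer arr ((arr.length : Int) - 0).toNat 0 [] rfl (by omega) (by omega)]
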